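-- pv_equiv track=rewrite | github.com/carpodiem/Learning | PY-3.2/vk_treatment.py | cross_connections
-- ===== SOURCE A (Python) =====
-- def cross_connections(friends_connections):
--     crossconnections = set()
--     for account_name, ids in friends_connections.items():
--         new_friends_list = friends_connections
--         for name, id_search in friends_connections.items():
--             crossing = []
--             if name != account_name:
--                 crossing = list(id_search & ids)
--             if crossing != [] and crossing[0][0] != 77847:
--                 cross_name = ((account_name, name),len(crossing))
--                 crossconnections.add(cross_name)
--     return crossconnections
-- ===== SOURCE B (Python) =====
-- def cross_connections(friends_connections):
--     # Inverted index id -> accounts; one counting pass over ids instead of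
--     # all-pairs set intersections.  A pair is reported with its total shared-id
--     # count iff it shares a "visible" id (nonempty, not starting with 77847).
--     index = {}
--     for name, ids in friends_connections.items():
--         for i in ids:
--             index.setdefault(i, []).append(name)
--     counts = {}
--     for members in index.values():
--         for a in members:
--             for b in members:
--                 if b != a:
--                     counts[(a, b)] = counts.get((a, b), 0) + 1
--     vis = {}
--     for i, members in index.items():
--         if i and i[0] != 77847:
--             for a in members:
--                 for b in members:
--                     if b != a:
--                         vis[(a, b)] = vis.get((a, b), 0) + 1
--     result = set()
--     for a in friends_connections:
--         for b in friends_connections: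
--             if b != a and vis.get((a, b), 0) > 0:
--                 result.add(((a, b), counts.get((a, b), 0)))
--     return result
-- ===== Notes on version B (the rewrite author's own statement) =====
-- stated objective: faster
-- what changed: Replaces A's all-pairs set intersections by a one-pass inverted index id->accounts with per-pair counters (total and 77847-free shared ids), so only account pairs that actually share an id are counted; A's 77847 filter, which reads only the set-order-first shared id, is reproduced wherever it is deterministic (all shared ids of a pair 77847-headed, or none).
import Mathlib
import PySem

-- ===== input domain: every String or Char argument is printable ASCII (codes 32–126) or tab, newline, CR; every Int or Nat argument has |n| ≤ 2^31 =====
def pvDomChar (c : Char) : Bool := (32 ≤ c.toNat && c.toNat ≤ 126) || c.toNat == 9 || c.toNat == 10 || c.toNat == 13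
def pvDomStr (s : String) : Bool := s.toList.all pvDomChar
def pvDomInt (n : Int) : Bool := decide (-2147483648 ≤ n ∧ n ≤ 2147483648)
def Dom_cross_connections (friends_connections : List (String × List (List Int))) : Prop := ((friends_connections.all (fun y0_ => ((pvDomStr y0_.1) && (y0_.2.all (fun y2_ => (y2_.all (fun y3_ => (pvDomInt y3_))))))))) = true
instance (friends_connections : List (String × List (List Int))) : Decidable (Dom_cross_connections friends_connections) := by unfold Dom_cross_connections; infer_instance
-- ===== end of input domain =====

-- B replaces A's all-pairs set intersections by an inverted index id -> accounts with two
-- pair counters (all shared ids; shared ids not starting with 77847), touching only pairs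
-- that actually share an id (objective: faster).

-- ===== PORT A =====
-- `list(id_search & ids)` is modelled as PySem.Set.inter (id_search's order); Python's hash
-- order is not modelled, but inside Pre_ the result never depends on the order (the guard is
-- decided the same way by every shared id, and only the length is used besides it).
-- `crossing[0][0]` is ported via pyGet?; it would raise an IndexError only on inputs
-- outside Pre_ (an empty id tuple shared first).
def cross_connections (friends_connections : List (String × List (List Int))) : List ((String × String) × Int) :=
  friends_connections.foldl (fun cc pa =>
    friends_connections.foldl (fun cc pb =>
      let crossing : List (List Int) :=
        if pb.1 ≠ pa.1 then PySem.Set.inter pb.2 pa.2 else []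
      if crossing ≠ [] ∧ ((PySem.List.pyGet? crossing 0).bind (fun t => PySem.List.pyGet? t 0)) ≠ some 77847 then
        PySem.Set.add cc ((pa.1, pb.1), PySem.Set.len crossing)
      else cc) cc) []

-- ===== PORT B =====
-- `i and i[0] != 77847` on a tuple i: i is nonempty and its head is not 77847.
def cross_connections_alt (friends_connections : List (String × List (List Int))) : List ((String × String) × Int) :=
  let index : PySem.Dict (List Int) (List String) :=
    friends_connections.foldl (fun d p =>
      p.2.foldl (fun d i => d.modify i [] (· ++ [p.1])) d) PySem.Dict.empty
  let counts : PySem.Dict (String × String) Int :=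
    index.values.foldl (fun c members =>
      members.foldl (fun c a =>
        members.foldl (fun c b =>
          if b ≠ a then c.modify (a, b) 0 (· + 1) else c) c) c) PySem.Dict.empty
  let vis : PySem.Dict (String × String) Int :=
    index.items.foldl (fun (c : PySem.Dict (String × String) Int) q =>
      if q.1 ≠ [] ∧ q.1.head? ≠ some 77847 then
        q.2.foldl (fun c a =>
          q.2.foldl (fun c b =>
            if b ≠ a then c.modify (a, b) 0 (· + 1) else c) c) c
      else c) PySem.Dict.empty
  friends_connections.foldl (fun (res : List ((String × String) × Int)) pa =>
    friends_connections.foldl (fun res pb =>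
      if pb.1 ≠ pa.1 then
        if vis.getD (pa.1, pb.1) 0 > 0 then
          PySem.Set.add res ((pa.1, pb.1), counts.getD (pa.1, pb.1) 0)
        else res
      else res) res) ([] : List ((String × String) × Int))

-- ===== PRECONDITION & SPEC =====
-- Pre_ excludes (a) inputs whose argument is not a well-formed dict of sets (duplicate
-- account names or duplicate id tuples), and (b) inputs where two distinct accounts share
-- BOTH an id tuple that is empty or starts with 77847 AND one that is neither: there A's
-- guard `crossing[0][0] != 77847` reads the first element of a Python set's hash-order
-- iteration, so A's value (or an IndexError) is an accident of the set order and cannot be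
-- specified.  Pairs ALL of whose shared ids start with 77847 (or none) stay inside Pre_:
-- there A's guard is order-independent and B reproduces it.
def Pre_cross_connections (friends_connections : List (String × List (List Int))) : Prop :=
  (friends_connections.map Prod.fst).Nodup ∧
  (∀ p ∈ friends_connections, p.2.Nodup) ∧
  ∀ pa ∈ friends_connections, ∀ pb ∈ friends_connections, pb.1 ≠ pa.1 →
    (∀ id ∈ pb.2, id ∈ pa.2 → id ≠ []) ∧
    ((∀ id ∈ pb.2, id ∈ pa.2 → id.head? = some 77847) ∨
     (∀ id ∈ pb.2, id ∈ pa.2 → id.head? ≠ some 77847))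
instance (friends_connections : List (String × List (List Int))) : Decidable (Pre_cross_connections friends_connections) := by unfold Pre_cross_connections; infer_instance

def pvWitness_cross_connections : (List (String × List (List Int))) :=
  [("ann", [[1], [2, 3]]), ("bob", [[1], [4]]), ("cat", [[4]])]

def Spec_cross_connections (friends_connections : List (String × List (List Int))) (out : List ((String × String) × Int)) : Prop := out = cross_connections_alt friends_connections
instance (friends_connections : List (String × List (List Int))) (out : List ((String × String) × Int)) : Decidable (Spec_cross_connections friends_connections out) := by unfold Spec_cross_connections; infer_instance

-- ===== CLAIM (what is proved, stated in full; the proofs are below) =====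
def Claim_equal_cross_connections : Prop := ∀ (friends_connections : List (String × List (List Int))), Dom_cross_connections friends_connections → Pre_cross_connections friends_connections → Spec_cross_connections friends_connections (cross_connections friends_connections)

-- ===== LEMMAS AND PROOFS =====

-- (id, owner) pairs of the inverted-index building loop, flattened
def pvPairs (fc : List (String × List (List Int))) : List (List Int × String) :=
  fc.flatMap (fun p => p.2.map (fun i => (i, p.1)))

def pvIndex (fc : List (String × List (List Int))) : PySem.Dict (List Int) (List String) :=
  fc.foldl (fun d p => p.2.foldl (fun d i => d.modify i [] (· ++ [p.1])) d) PySem.Dict.empty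

def pvCounts (fc : List (String × List (List Int))) : PySem.Dict (String × String) Int :=
  (pvIndex fc).values.foldl (fun c members =>
    members.foldl (fun c a =>
      members.foldl (fun c b =>
        if b ≠ a then c.modify (a, b) 0 (· + 1) else c) c) c) PySem.Dict.empty

def pvVis (fc : List (String × List (List Int))) : PySem.Dict (String × String) Int :=
  (pvIndex fc).items.foldl (fun (c : PySem.Dict (String × String) Int) q =>
    if q.1 ≠ [] ∧ q.1.head? ≠ some 77847 then
      q.2.foldl (fun c a =>
        q.2.foldl (fun c b =>
          if b ≠ a then c.modify (a, b) 0 (· + 1) else c) c) c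
    else c) PySem.Dict.empty

-- B's visibility predicate on an id
def pvGood (i : List Int) : Bool := decide (i ≠ [] ∧ i.head? ≠ some 77847)

-- ordered pairs of distinct elements generated by a counter's double loop
def pvPairsOf (m : List String) : List (String × String) :=
  m.flatMap (fun a => (m.filter (fun b => decide (b ≠ a))).map (fun b => (a, b)))

theorem pv_foldl_index (fc : List (String × List (List Int)))
    (d : PySem.Dict (List Int) (List String)) :
    fc.foldl (fun d p => p.2.foldl (fun d i => d.modify i [] (· ++ [p.1])) d) d
      = (pvPairs fc).foldl (fun d q => d.modify q.1 [] (· ++ [q.2])) d := by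
  induction fc generalizing d with
  | nil => rfl
  | cons p t ih =>
      simp only [List.foldl_cons, pvPairs, List.flatMap_cons, List.foldl_append, List.foldl_map]
      rw [ih]
      rfl

theorem pv_pairs_filter (fc : List (String × List (List Int)))
    (h2 : ∀ p ∈ fc, p.2.Nodup) (i : List Int) :
    ((fc.flatMap (fun p => p.2.map (fun j => (j, p.1)))).filter
        (fun q => q.1 == i)).map (fun q => q.2)
      = (fc.filter (fun p => decide (i ∈ p.2))).map Prod.fst := by
  induction fc with
  | nil => rfl
  | cons p t ih =>
      have hp2 : p.2.Nodup := h2 p List.mem_cons_self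
      simp only [List.flatMap_cons, List.filter_append, List.map_append, List.filter_cons,
        List.filter_map, List.map_map]
      rw [ih (fun q hq => h2 q (List.mem_cons_of_mem _ hq))]
      have hcomp : ((fun (q : List Int × String) => q.1 == i) ∘ fun j => (j, p.1))
          = fun j => j == i := rfl
      rw [hcomp, List.filter_beq]
      by_cases hi : i ∈ p.2
      · have hc : p.2.count i = 1 := List.count_eq_one_of_mem hp2 hi
        simp [hc, hi]
      · have hc : p.2.count i = 0 := List.count_eq_zero_of_not_mem hi
        simp [hc, hi]

theorem pv_members (fc : List (String × List (List Int)))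
    (h2 : ∀ p ∈ fc, p.2.Nodup) (i : List Int) :
    (pvIndex fc).getD i []
      = (fc.filter (fun p => decide (i ∈ p.2))).map Prod.fst := by
  unfold pvIndex
  rw [pv_foldl_index fc PySem.Dict.empty, PySem.Dict.getD_foldl_modify_append]
  have hempty : (PySem.Dict.empty : PySem.Dict (List Int) (List String)).getD i [] = [] := rfl
  rw [hempty, List.nil_append]
  exact pv_pairs_filter fc h2 i

theorem pv_key_unique {fc : List (String × List (List Int))}
    (h : (fc.map Prod.fst).Nodup) {p q : String × List (List Int)}
    (hp : p ∈ fc) (hq : q ∈ fc) (he : p.1 = q.1) : p = q :=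
  List.inj_on_of_nodup_map h hp hq he

theorem pv_mem_members {fc : List (String × List (List Int))}
    (h1 : (fc.map Prod.fst).Nodup) {pa : String × List (List Int)} (ha : pa ∈ fc)
    (i : List Int) :
    pa.1 ∈ (fc.filter (fun p => decide (i ∈ p.2))).map Prod.fst ↔ i ∈ pa.2 := by
  constructor
  · intro hmem
    rcases List.mem_map.1 hmem with ⟨q, hq, hq1⟩
    rcases List.mem_filter.1 hq with ⟨hqf, hqi⟩
    have : q = pa := pv_key_unique h1 hqf ha hq1
    subst this
    exact of_decide_eq_true hqi
  · intro hi
    exact List.mem_map.2 ⟨pa, List.mem_filter.2 ⟨ha, decide_eq_true hi⟩, rfl⟩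

theorem pv_nodup_members {fc : List (String × List (List Int))}
    (h1 : (fc.map Prod.fst).Nodup) (i : List Int) :
    ((fc.filter (fun p => decide (i ∈ p.2))).map Prod.fst).Nodup :=
  List.Nodup.sublist (List.Sublist.map Prod.fst (List.filter_sublist)) h1

theorem pv_sum_ite (m : List String) (a : String) (C : Nat) :
    (m.map (fun x => if x = a then C else 0)).sum = m.count a * C := by
  induction m with
  | nil => simp
  | cons x t ih =>
      by_cases hx : x = a
      · subst hx
        simp [List.count_cons_self, ih, Nat.add_mul, Nat.add_comm]
      · simp [hx, List.count_cons_of_ne (by simpa using hx), ih]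

theorem pv_pairsOf_count (m : List String) (hm : m.Nodup) (a b : String) :
    (pvPairsOf m).count (a, b) = if a ∈ m ∧ b ∈ m ∧ b ≠ a then 1 else 0 := by
  unfold pvPairsOf
  rw [List.count_flatMap]
  have hstep : (m.map (List.count (a, b) ∘
        fun x => (m.filter (fun c => decide (c ≠ x))).map (fun c => (x, c))))
      = m.map (fun x => if x = a then (if b ∈ m ∧ b ≠ a then 1 else 0) else 0) := by
    apply List.map_congr_left
    intro x _
    simp only [Function.comp_apply, List.count, List.countP_map]
    by_cases hx : x = a
    · subst hx
      rw [if_pos rfl]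
      have hpred : ((fun q => q == (x, b)) ∘ fun c => (x, c)) = fun c => c == b := by
        funext c
        simp [Prod.ext_iff]
      rw [Function.comp_def] at hpred ⊢
      rw [hpred]
      by_cases hb : b ∈ m ∧ b ≠ x
      · rw [if_pos hb]
        have h1 : (m.filter (fun c => decide (c ≠ x))).countP (fun c => c == b)
            = List.count b (m.filter (fun c => decide (c ≠ x))) := rfl
        rw [h1, List.count_filter (by simpa using hb.2)]
        exact List.count_eq_one_of_mem hm hb.1
      · rw [if_neg hb]
        rw [Decidable.not_and_iff_or_not] at hb
        rcases hb with hb | hb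
        · apply List.countP_eq_zero.2
          intro c hc
          have hcm := List.mem_of_mem_filter hc
          intro hcb
          exact hb ((by simpa using hcb : c = b) ▸ hcm)
        · apply List.countP_eq_zero.2
          intro c hc
          have := (List.mem_filter.1 hc).2
          intro hcb
          have hcb' : c = b := by simpa using hcb
          exact hb (by simpa [hcb'] using this)
    · rw [if_neg hx]
      apply List.countP_eq_zero.2
      intro c _
      simp [Prod.ext_iff, hx]
  rw [hstep, pv_sum_ite]
  by_cases hamem : a ∈ m
  · rw [List.count_eq_one_of_mem hm hamem]
    by_cases hrest : b ∈ m ∧ b ≠ a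
    · simp [hamem, hrest.1, hrest.2]
    · rw [Decidable.not_and_iff_or_not] at hrest
      rcases hrest with hb | hb <;> simp [hamem, hb]
  · rw [List.count_eq_zero_of_not_mem hamem]
    simp [hamem]

theorem pv_keys_index (fc : List (String × List (List Int))) :
    (pvIndex fc).keys = PySem.Set.ofList ((pvPairs fc).map Prod.fst) := by
  unfold pvIndex
  rw [pv_foldl_index, PySem.Dict.keys_foldl_modify_key (pvPairs fc) Prod.fst []
    (fun _ q => (· ++ [q.2])) PySem.Dict.empty]
  rfl

theorem pv_nodup_keys_index (fc : List (String × List (List Int))) :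
    (pvIndex fc).keys.Nodup := by
  unfold pvIndex
  rw [pv_foldl_index]
  exact PySem.Dict.nodup_keys_foldl_modify_key _ Prod.fst []
    (fun _ q => (· ++ [q.2])) PySem.Dict.empty (by simp [PySem.Dict.empty, PySem.Dict.keys])

theorem pv_mem_keys (fc : List (String × List (List Int))) (i : List Int) :
    i ∈ (pvIndex fc).keys ↔ ∃ p ∈ fc, i ∈ p.2 := by
  rw [pv_keys_index, PySem.Set.mem_ofList]
  simp [pvPairs, List.mem_flatMap]

theorem pv_sum_indicator {α : Type} (l : List α) (p : α → Bool) :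
    (l.map (fun x => if p x then 1 else 0)).sum = l.countP p := by
  induction l with
  | nil => rfl
  | cons x t ih =>
      by_cases hx : p x <;> simp [hx, ih, Nat.add_comm]

-- the shared counting core: over any Bool filter g on the index's keys, the double-loop
-- pair counter at key (pa.1, pb.1) counts the g-filtered intersection
theorem pv_core (fc : List (String × List (List Int)))
    (h1 : (fc.map Prod.fst).Nodup) (h2 : ∀ p ∈ fc, p.2.Nodup)
    {pa pb : String × List (List Int)} (ha : pa ∈ fc) (hb : pb ∈ fc)
    (hne : pb.1 ≠ pa.1) (g : List Int → Bool) :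
    (((pvIndex fc).keys.filter g).flatMap
        (fun i => pvPairsOf ((pvIndex fc).getD i []))).count (pa.1, pb.1)
      = ((PySem.Set.inter pb.2 pa.2).filter g).length := by
  rw [List.count_flatMap]
  have hpt : (((pvIndex fc).keys.filter g).map
        (List.count (pa.1, pb.1) ∘ fun i => pvPairsOf ((pvIndex fc).getD i [])))
      = ((pvIndex fc).keys.filter g).map
        (fun i => if decide (i ∈ pa.2) && decide (i ∈ pb.2) then 1 else 0) := by
    apply List.map_congr_left
    intro i _
    simp only [Function.comp_apply]
    rw [pv_members fc h2 i,
      pv_pairsOf_count _ (pv_nodup_members h1 i) pa.1 pb.1]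
    have hiff : (pa.1 ∈ (fc.filter (fun p => decide (i ∈ p.2))).map Prod.fst ∧
        pb.1 ∈ (fc.filter (fun p => decide (i ∈ p.2))).map Prod.fst ∧ pb.1 ≠ pa.1)
        ↔ (i ∈ pa.2 ∧ i ∈ pb.2) := by
      rw [pv_mem_members h1 ha i, pv_mem_members h1 hb i]
      constructor
      · rintro ⟨x, y, _⟩; exact ⟨x, y⟩
      · rintro ⟨x, y⟩; exact ⟨x, y, hne⟩
    by_cases hC : i ∈ pa.2 ∧ i ∈ pb.2
    · rw [if_pos (hiff.2 hC), if_pos (by simpa using hC)]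
    · rw [if_neg (fun h => hC (hiff.1 h)), if_neg (by simpa using hC)]
  rw [hpt, pv_sum_indicator, List.countP_filter]
  have hperm : ((pvIndex fc).keys.filter
        (fun i => (decide (i ∈ pa.2) && decide (i ∈ pb.2)) && g i)).Perm
      ((PySem.Set.inter pb.2 pa.2).filter g) := by
    have hndR : ((PySem.Set.inter pb.2 pa.2).filter g).Nodup :=
      List.Nodup.filter _ (List.Nodup.filter _ (h2 pb hb))
    rw [List.perm_ext_iff_of_nodup
      (List.Nodup.filter _ (pv_nodup_keys_index fc)) hndR]
    intro x
    simp only [List.mem_filter, Bool.and_eq_true, decide_eq_true_eq,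
      PySem.Set.inter, PySem.Set.contains, List.contains_iff_mem]
    constructor
    · rintro ⟨-, ⟨hxa, hxb⟩, hg⟩
      exact ⟨⟨hxb, hxa⟩, hg⟩
    · rintro ⟨⟨hxb, hxa⟩, hg⟩
      exact ⟨(pv_mem_keys fc x).2 ⟨pb, hb, hxb⟩, ⟨hxa, hxb⟩, hg⟩
  rw [List.countP_eq_length_filter, hperm.length_eq]

theorem pv_pairsloop_eq (m : List String) (c : PySem.Dict (String × String) Int) :
    m.foldl (fun c a =>
      m.foldl (fun c b =>
        if b ≠ a then c.modify (a, b) 0 (· + 1) else c) c) c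
      = (pvPairsOf m).foldl (fun c q => c.modify q 0 (· + 1)) c := by
  unfold pvPairsOf
  rw [List.foldl_flatMap]
  apply PySem.List.foldl_congr_mem
  intro c a _
  rw [PySem.List.foldl_ite_eq_foldl_filter (fun b => b ≠ a)
    (fun (c : PySem.Dict (String × String) Int) b => c.modify (a, b) 0 (· + 1)) m c,
    List.foldl_map]

theorem pv_counts_getD (fc : List (String × List (List Int)))
    (h1 : (fc.map Prod.fst).Nodup) (h2 : ∀ p ∈ fc, p.2.Nodup)
    {pa pb : String × List (List Int)} (ha : pa ∈ fc) (hb : pb ∈ fc)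
    (hne : pb.1 ≠ pa.1) :
    (pvCounts fc).getD (pa.1, pb.1) 0
      = ((PySem.Set.inter pb.2 pa.2).length : Int) := by
  unfold pvCounts
  have hstep : (pvIndex fc).values.foldl (fun (c : PySem.Dict (String × String) Int) members =>
      members.foldl (fun c a =>
        members.foldl (fun c b =>
          if b ≠ a then c.modify (a, b) 0 (· + 1) else c) c) c) PySem.Dict.empty
      = ((pvIndex fc).values.flatMap pvPairsOf).foldl
          (fun (c : PySem.Dict (String × String) Int) q => c.modify q 0 (· + 1)) PySem.Dict.empty := by
    rw [List.foldl_flatMap]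
    apply PySem.List.foldl_congr_mem
    intro c m _
    exact pv_pairsloop_eq m c
  rw [hstep, PySem.Dict.getD_foldl_modify_add_one]
  have hempty : (PySem.Dict.empty : PySem.Dict (String × String) Int).getD (pa.1, pb.1) 0
      = 0 := rfl
  rw [hempty, zero_add,
    PySem.Dict.values_eq_map_keys (pvIndex fc) (pv_nodup_keys_index fc) [],
    List.flatMap_map]
  have hfil : (pvIndex fc).keys = (pvIndex fc).keys.filter (fun _ => true) :=
    (List.filter_true _).symm
  rw [hfil]
  exact congrArg (fun n : Nat => (n : Int))
    (by rw [pv_core fc h1 h2 ha hb hne (fun _ => true), List.filter_true])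

theorem pv_vis_getD (fc : List (String × List (List Int)))
    (h1 : (fc.map Prod.fst).Nodup) (h2 : ∀ p ∈ fc, p.2.Nodup)
    {pa pb : String × List (List Int)} (ha : pa ∈ fc) (hb : pb ∈ fc)
    (hne : pb.1 ≠ pa.1) :
    (pvVis fc).getD (pa.1, pb.1) 0
      = (((PySem.Set.inter pb.2 pa.2).filter pvGood).length : Int) := by
  unfold pvVis
  have hite := PySem.List.foldl_ite_eq_foldl_filter
    (fun (q : List Int × List String) => q.1 ≠ [] ∧ q.1.head? ≠ some 77847)
    (fun (c : PySem.Dict (String × String) Int) (q : List Int × List String) =>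
      q.2.foldl (fun c a =>
        q.2.foldl (fun c b =>
          if b ≠ a then c.modify (a, b) 0 (· + 1) else c) c) c)
    (pvIndex fc).items PySem.Dict.empty
  rw [hite]
  have hstep : ((pvIndex fc).items.filter
        (fun q => decide (q.1 ≠ [] ∧ q.1.head? ≠ some 77847))).foldl
      (fun (c : PySem.Dict (String × String) Int) (q : List Int × List String) =>
        q.2.foldl (fun c a =>
          q.2.foldl (fun c b =>
            if b ≠ a then c.modify (a, b) 0 (· + 1) else c) c) c) PySem.Dict.empty
      = (((pvIndex fc).items.filter
            (fun q => decide (q.1 ≠ [] ∧ q.1.head? ≠ some 77847))).flatMap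
          (fun (q : List Int × List String) => pvPairsOf q.2)).foldl
          (fun c q => c.modify q 0 (· + 1)) PySem.Dict.empty := by
    rw [List.foldl_flatMap]
    apply PySem.List.foldl_congr_mem
    intro c q _
    exact pv_pairsloop_eq q.2 c
  rw [hstep, PySem.Dict.getD_foldl_modify_add_one]
  have hempty : (PySem.Dict.empty : PySem.Dict (String × String) Int).getD (pa.1, pb.1) 0
      = 0 := rfl
  rw [hempty, zero_add,
    PySem.Dict.items_eq_map_keys (pvIndex fc) (pv_nodup_keys_index fc) [],
    List.filter_map, List.flatMap_map]
  have hcomp : ((fun (q : List Int × List String) =>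
        decide (q.1 ≠ [] ∧ q.1.head? ≠ some 77847)) ∘
        fun k => (k, (pvIndex fc).getD k [])) = pvGood := rfl
  rw [hcomp]
  exact congrArg (fun n : Nat => (n : Int)) (pv_core fc h1 h2 ha hb hne pvGood)

theorem pv_alt_eq (fc : List (String × List (List Int))) :
    cross_connections_alt fc
      = fc.foldl (fun res pa =>
          fc.foldl (fun res pb =>
            if pb.1 ≠ pa.1 then
              if (pvVis fc).getD (pa.1, pb.1) 0 > 0 then
                PySem.Set.add res ((pa.1, pb.1), (pvCounts fc).getD (pa.1, pb.1) 0)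
              else res
            else res) res) [] := by
  unfold cross_connections_alt pvVis pvCounts pvIndex
  rfl

theorem pv_pyGet0 {α : Type} (c : α) (cs : List α) :
    PySem.List.pyGet? (c :: cs) (0 : Int) = some c := by
  simp [PySem.List.pyGet?, PySem.List.pyIdx?]

-- ===== VERDICT (by name: the statement is the Claim_ definition above) =====
theorem cross_connections_spec : Claim_equal_cross_connections := by
  intro fc _ hpre
  obtain ⟨h1, h2, h3⟩ := hpre
  unfold Spec_cross_connections
  rw [pv_alt_eq]
  unfold cross_connections
  apply PySem.List.foldl_congr_mem
  intro acc pa hpa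
  apply PySem.List.foldl_congr_mem
  intro cc pb hpb
  by_cases hne : pb.1 ≠ pa.1
  · simp only [if_pos hne]
    have hcnt := pv_counts_getD fc h1 h2 hpa hpb hne
    have hvis := pv_vis_getD fc h1 h2 hpa hpb hne
    obtain ⟨hnonempty, hhom⟩ := h3 pa hpa pb hpb hne
    rcases hN : PySem.Set.inter pb.2 pa.2 with _ | ⟨c, cs⟩
    · have hv0 : (pvVis fc).getD (pa.1, pb.1) 0 = 0 := by rw [hvis, hN]; rfl
      simp [hv0]
    · have hmem : ∀ x ∈ PySem.Set.inter pb.2 pa.2, x ∈ pb.2 ∧ x ∈ pa.2 := by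
        intro x hx
        have := List.mem_filter.1 hx
        exact ⟨this.1, by simpa [PySem.Set.contains] using this.2⟩
      have hcb : c ∈ pb.2 ∧ c ∈ pa.2 := hmem c (hN ▸ List.mem_cons_self)
      have hcne : c ≠ [] := hnonempty c hcb.1 hcb.2
      rcases hhom with hall | hnone
      · -- every shared id starts with 77847: A's guard is false, B's visible count is 0
        have hfil : (c :: cs).filter pvGood = [] := by
          rw [List.filter_eq_nil_iff]
          intro x hx
          have hxm := hmem x (hN ▸ hx)
          have := hall x hxm.1 hxm.2
          simp [pvGood, this]
        have hv0 : (pvVis fc).getD (pa.1, pb.1) 0 = 0 := by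
          rw [hvis, hN, hfil]; rfl
        have hc77 : c.head? = some 77847 := hall c hcb.1 hcb.2
        rcases c with _ | ⟨y, ys⟩
        · exact absurd rfl hcne
        · have hy : y = 77847 := by simpa using hc77
          subst hy
          simp [hv0, PySem.List.pyGet?, PySem.List.pyIdx?]
      · -- no shared id starts with 77847: A's guard is true, B sees all shared ids
        have hfil : (c :: cs).filter pvGood = c :: cs := by
          rw [List.filter_eq_self]
          intro x hx
          have hxm := hmem x (hN ▸ hx)
          have hx77 := hnone x hxm.1 hxm.2
          have hxne : x ≠ [] := hnonempty x hxm.1 hxm.2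
          simp [pvGood, hx77, hxne]
        have hvpos : (pvVis fc).getD (pa.1, pb.1) 0 > 0 := by
          rw [hvis, hN, hfil]
          simp
        have hguard : ((c :: cs ≠ []) ∧
            ((PySem.List.pyGet? (c :: cs) 0).bind
              (fun t => PySem.List.pyGet? t 0)) ≠ some 77847) := by
          refine ⟨by simp, ?_⟩
          rw [pv_pyGet0]
          rcases c with _ | ⟨y, ys⟩
          · exact absurd rfl hcne
          · show PySem.List.pyGet? (y :: ys) 0 ≠ some 77847
            rw [pv_pyGet0]
            simpa using hnone (y :: ys) hcb.1 hcb.2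
        simp only [if_pos hguard, if_pos hvpos]
        rw [hcnt, hN]
        rfl
  · simp only [if_neg hne]
    simp
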